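-- pv_equiv track=rewrite | github.com/Rishat-F/secretary | src/business_logic/utils.py | _no_isolated_selected
-- ===== SOURCE A (Python) =====
-- MINIMAL_TIMES_STATUSES_LEN = 3
--
-- class ScheduleTimeStatus:
--     NOT_SELECTED = "not_selected"
--     SELECTED = "selected"
--     EDGE = "edge"
--
-- def _no_isolated_selected(times_statuses: list[str]) -> bool:
--     assert len(times_statuses) >= MINIMAL_TIMES_STATUSES_LEN
--     if (
--         times_statuses[0] == ScheduleTimeStatus.SELECTED
--         and times_statuses[1] != ScheduleTimeStatus.SELECTED
--     ) or (
--         times_statuses[-1] == ScheduleTimeStatus.SELECTED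
--         and times_statuses[-2] != ScheduleTimeStatus.SELECTED
--     ):
--         return False
--     for i in range(1, len(times_statuses) - 1):
--         if (
--             times_statuses[i] == ScheduleTimeStatus.SELECTED
--             and times_statuses[i-1] != ScheduleTimeStatus.SELECTED
--             and times_statuses[i+1] != ScheduleTimeStatus.SELECTED
--         ):
--             return False
--     return True
-- ===== SOURCE B (Python) =====
-- MINIMAL_TIMES_STATUSES_LEN = 3
--
-- SELECTED = "selected"
--
-- def _no_isolated_selected(times_statuses: list[str]) -> bool:
--     # One pass, run-length style: "no isolated selected" == every maximal
--     # run of consecutive SELECTED elements has length >= 2.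
--     assert len(times_statuses) >= MINIMAL_TIMES_STATUSES_LEN
--     run = 0
--     for status in times_statuses:
--         if status == SELECTED:
--             run += 1
--         else:
--             if run == 1:
--                 return False
--             run = 0
--     return run != 1
-- ===== Notes on version B (the rewrite author's own statement) =====
-- stated objective: simpler
-- what changed: Replaced the boundary-branch plus index-window scan with one run-length pass that tracks the length of the current run of consecutive 'selected' elements and fails exactly when a run closes at length 1; this removes the separate endpoint checks and all indexing.
import Mathlib
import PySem

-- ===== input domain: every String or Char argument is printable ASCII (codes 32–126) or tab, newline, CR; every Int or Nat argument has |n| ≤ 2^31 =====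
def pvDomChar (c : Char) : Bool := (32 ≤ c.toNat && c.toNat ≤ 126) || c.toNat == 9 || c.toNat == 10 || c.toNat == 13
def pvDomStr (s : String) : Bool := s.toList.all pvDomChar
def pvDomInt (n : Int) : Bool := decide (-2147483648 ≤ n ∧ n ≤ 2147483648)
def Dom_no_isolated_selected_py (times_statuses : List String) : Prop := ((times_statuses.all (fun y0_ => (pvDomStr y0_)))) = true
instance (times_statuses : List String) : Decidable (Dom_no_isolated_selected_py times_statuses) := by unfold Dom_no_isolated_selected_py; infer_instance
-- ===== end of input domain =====

-- B replaces A's endpoint branches + index-window loop by a single run-length pass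
-- ("every maximal run of consecutive 'selected' has length ≥ 2"): simpler, no indexing.

-- ===== PORT A =====
def no_isolated_selected_py (times_statuses : List String) : Bool :=
  -- the Python 'assert len(...) >= 3' is Pre_no_isolated_selected_py
  if ((PySem.List.pyGetD times_statuses 0 "" == "selected")
        && !(PySem.List.pyGetD times_statuses 1 "" == "selected"))
     || ((PySem.List.pyGetD times_statuses (-1) "" == "selected")
        && !(PySem.List.pyGetD times_statuses (-2) "" == "selected"))
  then false
  else
    -- 'for i in range(1, len-1): if cond: return False / return True' = all indices fail cond
    (PySem.List.pyRange 1 ((times_statuses.length : Int) - 1) 1).all (fun i =>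
      !((PySem.List.pyGetD times_statuses i "" == "selected")
        && !(PySem.List.pyGetD times_statuses (i - 1) "" == "selected")
        && !(PySem.List.pyGetD times_statuses (i + 1) "" == "selected")))

-- ===== PORT B =====
-- 'run' = length of the current run of consecutive "selected"
def pvAltRun : List String → Nat → Bool
  | [], run => run != 1
  | s :: rest, run =>
    if s == "selected" then pvAltRun rest (run + 1)
    else if run == 1 then false else pvAltRun rest 0

def no_isolated_selected_py_alt (times_statuses : List String) : Bool :=
  -- the Python 'assert len(...) >= 3' is Pre_no_isolated_selected_py
  pvAltRun times_statuses 0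

-- ===== PRECONDITION & SPEC =====
-- A (and B) assert len >= 3: AssertionError on shorter lists, excluded here.
def Pre_no_isolated_selected_py (times_statuses : List String) : Prop :=
  3 ≤ times_statuses.length
instance (times_statuses : List String) : Decidable (Pre_no_isolated_selected_py times_statuses) := by
  unfold Pre_no_isolated_selected_py; infer_instance

def pvWitness_no_isolated_selected_py : List String :=
  ["selected", "selected", "not_selected"]

def Spec_no_isolated_selected_py (times_statuses : List String) (out : Bool) : Prop :=
  out = no_isolated_selected_py_alt times_statuses
instance (times_statuses : List String) (out : Bool) : Decidable (Spec_no_isolated_selected_py times_statuses out) := by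
  unfold Spec_no_isolated_selected_py; infer_instance

-- ===== CLAIM (what is proved, stated in full; the proofs are below) =====
def Claim_equal_no_isolated_selected_py : Prop :=
  ∀ (times_statuses : List String), Dom_no_isolated_selected_py times_statuses →
    Pre_no_isolated_selected_py times_statuses →
    Spec_no_isolated_selected_py times_statuses (no_isolated_selected_py times_statuses)

-- ===== LEMMAS AND PROOFS =====

-- check every element except the last for isolation, with 'prev' the selectedness of the left neighbour
def pvScan (prev : Bool) : List Bool → Bool
  | x :: y :: t => !(x && !prev && !y) && pvScan x (y :: t)
  | _ => true

-- the last-element isolation check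
def pvBack : List Bool → Bool
  | [x, y] => !(y && !x)
  | _ :: y :: z :: t => pvBack (y :: z :: t)
  | _ => true

-- full "no isolated selected" predicate: interior + last element
def pvNoIso (prev : Bool) : List Bool → Bool
  | [] => true
  | [x] => !(x && !prev)
  | x :: y :: t => !(x && !prev && !y) && pvNoIso x (y :: t)

theorem pvAltRun_cons (s : String) (rest : List String) (run : Nat) :
    pvAltRun (s :: rest) run =
      if s == "selected" then pvAltRun rest (run + 1)
      else if run == 1 then false else pvAltRun rest 0 := rfl

theorem pvAltRun_ge_two (ys : List String) :
    ∀ r, 2 ≤ r → pvAltRun ys r = pvAltRun ys 2 := by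
  induction ys with
  | nil => intro r hr; simp [pvAltRun]; omega
  | cons s t ih =>
    intro r hr
    rw [pvAltRun_cons, pvAltRun_cons]
    split
    · exact (ih (r+1) (by omega)).trans (ih 3 (by omega)).symm
    · have : (r == 1) = false := by simp; omega
      simp [this]

theorem pvAltRun_eq_noIso (xs : List String) :
    pvAltRun xs 0 = pvNoIso false (xs.map (fun s => s == "selected")) ∧
    pvAltRun xs 2 = pvNoIso true (xs.map (fun s => s == "selected")) := by
  match xs with
  | [] => simp [pvAltRun, pvNoIso]
  | [x] =>
    by_cases hx : (x == "selected") = true <;>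
      simp [pvAltRun, pvNoIso, hx]
  | x :: y :: t =>
    have ih1 := pvAltRun_eq_noIso (y :: t)
    have ih2 := pvAltRun_eq_noIso t
    constructor
    · rw [pvAltRun_cons]
      by_cases hx : (x == "selected") = true
      · rw [if_pos hx, pvAltRun_cons]
        by_cases hy : (y == "selected") = true
        · have h3 : pvNoIso true ((y :: t).map (fun s => s == "selected"))
              = pvNoIso true (t.map (fun s => s == "selected")) := by
            cases t <;> simp [pvNoIso, hy]
          rw [if_pos hy]
          simp only [List.map] at h3 ⊢
          simp [pvNoIso, hx, hy, ih2.2, ← h3]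
        · simp [pvNoIso, hx, hy]
      · rw [if_neg hx]
        simp only [List.map, pvNoIso]
        simp [hx, ih1.1]
    · rw [pvAltRun_cons]
      by_cases hx : (x == "selected") = true
      · have h23 := pvAltRun_ge_two (y :: t) 3 (by omega)
        rw [if_pos hx, show (2:Nat)+1 = 3 from rfl, h23]
        simp only [List.map, pvNoIso]
        simp [hx, ih1.2]
      · rw [if_neg hx]
        simp only [List.map, pvNoIso]
        simp [hx, ih1.1]
termination_by xs.length

theorem pvNoIso_eq_scan_back (prev a b : Bool) (t : List Bool) :
    pvNoIso prev (a :: b :: t) = (pvScan prev (a :: b :: t) && pvBack (a :: b :: t)) := by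
  induction t generalizing prev a b with
  | nil => cases a <;> cases b <;> cases prev <;> simp [pvNoIso, pvScan, pvBack]
  | cons c t ih =>
    have h1 : pvNoIso prev (a :: b :: c :: t) = (!(a && !prev && !b) && pvNoIso a (b :: c :: t)) := rfl
    have h2 : pvScan prev (a :: b :: c :: t) = (!(a && !prev && !b) && pvScan a (b :: c :: t)) := rfl
    have h3 : pvBack (a :: b :: c :: t) = pvBack (b :: c :: t) := rfl
    simp [h1, h2, h3, ih a b c, Bool.and_assoc]

theorem pvScan_eq_range (p : Bool) (bs : List Bool) :
    pvScan p bs = (List.range (bs.length - 1)).all (fun k =>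
      !(bs.getD k false && !((p :: bs).getD k false) && !(bs.getD (k+1) false))) := by
  induction bs generalizing p with
  | nil => simp [pvScan]
  | cons x t ih =>
    cases t with
    | nil => simp [pvScan]
    | cons y t' =>
      have hlen : (x :: y :: t').length - 1 = ((y :: t').length - 1) + 1 := by
        simp
      rw [hlen, List.range_succ_eq_map]
      simp only [List.all_cons, List.all_map]
      have hx : pvScan p (x :: y :: t') = (!(x && !p && !y) && pvScan x (y :: t')) := rfl
      rw [hx, ih x]
      have hfun : (fun k => !((y :: t').getD k false && !((x :: y :: t').getD k false)
            && !((y :: t').getD (k+1) false)))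
          = ((fun k => !((x :: y :: t').getD k false && !((p :: x :: y :: t').getD k false)
            && !((x :: y :: t').getD (k+1) false))) ∘ Nat.succ) := by
        funext k
        simp [Function.comp]
      rw [← hfun]
      simp [List.getD]

theorem pvBack_eq_getD (a b : Bool) (t : List Bool) :
    pvBack (a :: b :: t) =
      !((a :: b :: t).getD ((a :: b :: t).length - 1) false
        && !((a :: b :: t).getD ((a :: b :: t).length - 2) false)) := by
  induction t generalizing a b with
  | nil => simp [pvBack]
  | cons c t ih =>
    have : pvBack (a :: b :: c :: t) = pvBack (b :: c :: t) := rfl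
    rw [this, ih]
    simp only [List.length_cons]
    rfl

theorem getD_map_sel (xs : List String) (k : Nat) :
    (xs.map (fun s => s == "selected")).getD k false = (xs.getD k "" == "selected") := by
  simp only [List.getD, List.getElem?_map]
  cases xs[k]? <;> simp

-- ===== VERDICT (by name: the statement is the Claim_ definition above) =====
theorem no_isolated_selected_py_spec : Claim_equal_no_isolated_selected_py := by
  intro xs _hdom hpre
  have hlen : 3 ≤ xs.length := hpre
  unfold Spec_no_isolated_selected_py no_isolated_selected_py no_isolated_selected_py_alt
  rw [(pvAltRun_eq_noIso xs).1]
  -- turn every Python index access into 'getD' on the mapped Bool list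
  have hsel : ∀ k : Nat, (PySem.List.pyGetD xs (k : Int) "" == "selected")
      = (xs.map (fun s => s == "selected")).getD k false := by
    intro k
    rw [PySem.List.pyGetD_natCast, getD_map_sel]
  have hget : ∀ (j : Nat) (h : j < xs.length),
      (xs[j] == "selected") = (xs.map (fun s => s == "selected")).getD j false := by
    intro j h
    rw [getD_map_sel]
    congr 1
    simp [List.getD, List.getElem?_eq_getElem h]
  have h0 := hsel 0
  have h1 := hsel 1
  have hm1 : (PySem.List.pyGetD xs (-1) "" == "selected")
      = (xs.map (fun s => s == "selected")).getD (xs.length - 1) false := by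
    rw [PySem.List.pyGetD_neg_ofNat xs 1 "" (by omega) (by omega)]
    exact hget _ (by omega)
  have hm2 : (PySem.List.pyGetD xs (-2) "" == "selected")
      = (xs.map (fun s => s == "selected")).getD (xs.length - 2) false := by
    rw [PySem.List.pyGetD_neg_ofNat xs 2 "" (by omega) (by omega)]
    exact hget _ (by omega)
  simp only [Nat.cast_zero] at h0
  simp only [Nat.cast_one] at h1
  -- the loop: pyRange to List.range, and shift the cast indices
  rw [PySem.List.pyRange_one]
  have hr : (((xs.length : Int) - 1) - 1).toNat = xs.length - 2 := by omega
  rw [hr, List.all_map]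
  have hloop : ∀ k : Nat,
      (!((PySem.List.pyGetD xs (1 + (k:Int)) "" == "selected")
        && !(PySem.List.pyGetD xs ((1 + (k:Int)) - 1) "" == "selected")
        && !(PySem.List.pyGetD xs ((1 + (k:Int)) + 1) "" == "selected")))
      = (!((xs.map (fun s => s == "selected")).getD (k+1) false
        && !((xs.map (fun s => s == "selected")).getD k false)
        && !((xs.map (fun s => s == "selected")).getD (k+2) false))) := by
    intro k
    have e1 : (1 : Int) + (k:Int) = ((k+1 : Nat) : Int) := by push_cast; ring
    have e2 : ((1 : Int) + (k:Int)) - 1 = ((k : Nat) : Int) := by push_cast; ring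
    have e3 : ((1 : Int) + (k:Int)) + 1 = ((k+2 : Nat) : Int) := by push_cast; ring
    rw [e2, e3, e1, hsel, hsel, hsel]
  -- name the Bool list and its atoms
  rcases hxs : xs.map (fun s => s == "selected") with _ | ⟨p, _ | ⟨q, u⟩⟩
  · have h := congrArg List.length hxs
    simp only [List.length_map, List.length_nil] at h
    omega
  · have h := congrArg List.length hxs
    simp only [List.length_map, List.length_cons, List.length_nil] at h
    omega
  rw [hxs] at h0 h1 hm1 hm2 hloop
  simp only [List.getD_cons_zero, List.getD_cons_succ] at h0 h1
  have hbl : xs.length = u.length + 2 := by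
    have h := congrArg List.length hxs
    simp only [List.length_map, List.length_cons] at h
    omega
  -- right-hand side: pvNoIso = first window && interior scan && last check
  rw [pvNoIso_eq_scan_back, pvScan_eq_range, pvBack_eq_getD]
  have hlen2 : (p :: q :: u).length - 1 = (xs.length - 2) + 1 := by
    simp only [List.length_cons]; omega
  rw [hlen2, List.range_succ_eq_map, List.all_cons, List.all_map]
  have hi1 : xs.length - 2 + 1 = xs.length - 1 := by omega
  have hi2 : (p :: q :: u).length - 2 = xs.length - 2 := by
    simp only [List.length_cons]; omega
  rw [hi1, hi2]
  -- align the interior loop bodies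
  have hbody : ((fun i => !((PySem.List.pyGetD xs i "" == "selected")
        && !(PySem.List.pyGetD xs (i - 1) "" == "selected")
        && !(PySem.List.pyGetD xs (i + 1) "" == "selected"))) ∘ (fun k : Nat => (1:Int) + (k:Int)))
      = ((fun k => !((p :: q :: u).getD k false && !((false :: p :: q :: u).getD k false)
        && !((p :: q :: u).getD (k+1) false))) ∘ Nat.succ) := by
    funext k
    simp only [Function.comp_apply]
    rw [hloop k]
    simp [List.getD_cons_succ]
  rw [h0, h1, hm1, hm2, hbody]
  -- pure Boolean bookkeeping
  cases hE1 : (p :: q :: u).getD (xs.length - 1) false <;>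
    cases hE2 : (p :: q :: u).getD (xs.length - 2) false <;>
      cases p <;> cases q <;> simp [hE1, hE2]
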